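-- pv_equiv track=rewrite | github.com/aliza224566/cand_6bbb83ee | Q1.py | bow_transform
-- ===== SOURCE A (Python) =====
-- def bow_transform(corpus, vocab):
--     vocab_index = {term: i for i, term in enumerate(vocab)}
--     out = []
--
--     for doc in corpus:
--         tokens = doc.split()          # whitespace tokenization
--         counts = [0] * len(vocab)
--
--         for tok in tokens:
--             if tok in vocab_index:    # ignore tokens not in vocab
--                 counts[vocab_index[tok]] += 1
--
--         out.append(counts)
--
--     return out
-- ===== SOURCE B (Python) =====
-- def bow_transform(corpus, vocab):
--     vocab_index = {}
--     for i, term in enumerate(vocab):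
--         vocab_index[term] = i
--
--     out = []
--     for doc in corpus:
--         freq = {}
--         for tok in doc.split():
--             freq[tok] = freq.get(tok, 0) + 1
--
--         counts = [0] * len(vocab)
--         for term, i in vocab_index.items():
--             counts[i] = freq.get(term, 0)
--         out.append(counts)
--
--     return out
-- ===== Notes on version B (the rewrite author's own statement) =====
-- stated objective: alternative
-- what changed: The inner per-document loop is inverted: instead of iterating the document's tokens and incrementing counts via vocab_index membership tests, B builds a frequency table of the tokens once and then fills the count vector by iterating vocab_index.items() with counts[i] = freq.get(term, 0), preserving last-wins duplicate-vocab semantics.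
import Mathlib
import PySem

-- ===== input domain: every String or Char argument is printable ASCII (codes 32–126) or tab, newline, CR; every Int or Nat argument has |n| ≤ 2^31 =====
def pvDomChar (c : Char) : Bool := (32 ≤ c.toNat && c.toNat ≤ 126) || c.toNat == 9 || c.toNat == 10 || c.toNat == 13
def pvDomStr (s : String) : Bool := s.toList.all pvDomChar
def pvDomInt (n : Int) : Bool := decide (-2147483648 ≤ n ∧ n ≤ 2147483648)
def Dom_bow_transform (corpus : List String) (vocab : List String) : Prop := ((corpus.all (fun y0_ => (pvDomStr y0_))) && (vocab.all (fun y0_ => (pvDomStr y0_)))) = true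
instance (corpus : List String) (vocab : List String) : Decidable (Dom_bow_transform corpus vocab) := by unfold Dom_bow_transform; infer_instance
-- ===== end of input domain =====

-- B inverts the inner per-document loop: A iterates the document's tokens incrementing counts
-- via vocab_index membership; B builds a token-frequency dict once and fills the count vector
-- by iterating vocab_index.items() (alternative decomposition, same asymptotic cost).


-- ===== PORT A =====
-- vocab_index = {term: i for i, term in enumerate(vocab)}  (shared verbatim by both Pythons)
def vocabIndexOf (vocab : List String) : PySem.Dict String Int :=
  (PySem.List.enumerate vocab 0).foldl (fun d q => d.insert q.2 q.1) PySem.Dict.empty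

def bow_transform (corpus : List String) (vocab : List String) : List (List Int) :=
  let vidx := vocabIndexOf vocab
  corpus.foldl (fun out doc =>
    let tokens := PySem.Str.split₀ doc
    let counts : List Int := List.replicate vocab.length 0
    let counts := tokens.foldl (fun cs tok =>
      if vidx.contains tok then               -- 'if tok in vocab_index:'
        let i := vidx.getD tok 0              --   vocab_index[tok] (present under the guard)
        PySem.List.pySetD cs i (PySem.List.pyGetD cs i 0 + 1)   -- counts[i] += 1
      else cs) counts
    out ++ [counts]) []

-- ===== PORT B =====
def bow_transform_alt (corpus : List String) (vocab : List String) : List (List Int) :=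
  let vidx := vocabIndexOf vocab
  corpus.foldl (fun out doc =>
    -- freq = {}; for tok in doc.split(): freq[tok] = freq.get(tok, 0) + 1
    let freq := (PySem.Str.split₀ doc).foldl
      (fun d t => d.insert t (d.getD t 0 + 1)) PySem.Dict.empty
    -- counts = [0]*len(vocab); for term, i in vocab_index.items(): counts[i] = freq.get(term, 0)
    let counts := vidx.items.foldl
      (fun cs p => PySem.List.pySetD cs p.2 (freq.getD p.1 0))
      (List.replicate vocab.length (0 : Int))
    out ++ [counts]) []

-- ===== PRECONDITION & SPEC =====
def Spec_bow_transform (corpus : List String) (vocab : List String) (out : List (List Int)) : Prop := out = bow_transform_alt corpus vocab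
instance (corpus : List String) (vocab : List String) (out : List (List Int)) : Decidable (Spec_bow_transform corpus vocab out) := by unfold Spec_bow_transform; infer_instance

-- ===== CLAIM (what is proved, stated in full; the proofs are below) =====
def Claim_equal_bow_transform : Prop := ∀ (corpus : List String) (vocab : List String), Dom_bow_transform corpus vocab → Spec_bow_transform corpus vocab (bow_transform corpus vocab)

-- ===== LEMMAS AND PROOFS =====

-- Every binding the vocab_index fold ever looks up satisfies P when every inserted pair does.
theorem get?_foldl_insert_spec (l : List (Int × String)) (d : PySem.Dict String Int)
    (P : String → Int → Prop) (hd : ∀ k i, d.get? k = some i → P k i)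
    (hl : ∀ q ∈ l, P q.2 q.1) :
    ∀ k i, (l.foldl (fun d q => d.insert q.2 q.1) d).get? k = some i → P k i := by
  induction l generalizing d with
  | nil => exact hd
  | cons q l ih =>
    intro k i h
    refine ih (d.insert q.2 q.1) ?_ (fun r hr => hl r (by simp [hr])) k i h
    intro k' i' h'
    rw [PySem.Dict.get?_insert] at h'
    split at h'
    · rename_i hk; cases h'; exact hk ▸ hl q (by simp)
    · exact hd k' i' h'

-- The vocab_index lookup specification: a stored index is in range and points back at its key.
theorem vocabIndex_spec (vocab : List String) :
    ∀ k i, (vocabIndexOf vocab).get? k = some i →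
      0 ≤ i ∧ i.toNat < vocab.length ∧ vocab[i.toNat]? = some k := by
  refine get?_foldl_insert_spec _ _ _ (by simp [PySem.Dict.get?_empty]) ?_
  intro q hq
  rcases (PySem.List.mem_enumerate_iff vocab 0 q).1 hq with ⟨m, hm, rfl⟩
  simp [hm]

theorem vocabIndex_keys_nodup (vocab : List String) : (vocabIndexOf vocab).keys.Nodup :=
  PySem.Dict.nodup_keys_foldl_insert_key _ _ _ _ (by simp [PySem.Dict.keys_empty])

theorem vocabIndex_items_snd_nodup (vocab : List String) :
    ((vocabIndexOf vocab).items.map (·.2)).Nodup := by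
  have hk := vocabIndex_keys_nodup vocab
  simp only [PySem.Dict.keys] at hk
  have hitems : (vocabIndexOf vocab).items.Nodup := hk.of_map
  refine hitems.map_on ?_
  intro p hp q hq hpq
  have h1 := PySem.Dict.get?_of_mem_items _ (by exact (Prod.mk.eta (p := p)) ▸ hp) (vocabIndex_keys_nodup vocab)
  have h2 := PySem.Dict.get?_of_mem_items _ (by exact (Prod.mk.eta (p := q)) ▸ hq) (vocabIndex_keys_nodup vocab)
  have s1 := vocabIndex_spec vocab p.1 p.2 h1
  have s2 := vocabIndex_spec vocab q.1 q.2 h2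
  have : p.1 = q.1 := by
    have := s1.2.2
    rw [hpq, s2.2.2] at this
    exact (Option.some.inj this).symm
  exact Prod.ext this hpq

theorem getD_set_eq (l : List Int) (m j : Nat) (v : Int) (hm : m < l.length) :
    (l.set m v).getD j 0 = if m = j then v else l.getD j 0 := by
  by_cases h : m = j
  · subst h; simp [List.getD_eq_getElem?_getD, hm]
  · simp [List.getD_eq_getElem?_getD, h]


-- token-side loop characterisation
theorem lemA (vocab : List String) (tokens : List String) (cs : List Int)
    (hlen : cs.length = vocab.length) :
    (tokens.foldl (fun cs tok =>
      if (vocabIndexOf vocab).contains tok then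
        let i := (vocabIndexOf vocab).getD tok 0
        PySem.List.pySetD cs i (PySem.List.pyGetD cs i 0 + 1)
      else cs) cs).length = vocab.length ∧
    ∀ j : Nat, j < vocab.length →
      ((tokens.foldl (fun cs tok =>
        if (vocabIndexOf vocab).contains tok then
          let i := (vocabIndexOf vocab).getD tok 0
          PySem.List.pySetD cs i (PySem.List.pyGetD cs i 0 + 1)
        else cs) cs).getD j 0)
      = cs.getD j 0 + (tokens.countP (fun t => (vocabIndexOf vocab).get? t == some (j : Int)) : Int) := by
  induction tokens generalizing cs with
  | nil => simpa using hlen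
  | cons t ts ih =>
    simp only [List.foldl_cons, List.countP_cons]
    by_cases hc : (vocabIndexOf vocab).contains t
    case neg =>
      rw [if_neg hc]
      have hg : (vocabIndexOf vocab).get? t = none := by
        cases h : (vocabIndexOf vocab).get? t with
        | none => rfl
        | some v => exact absurd (by rw [PySem.Dict.contains_eq_isSome_get?, h]; rfl) hc
      obtain ⟨hL, hP⟩ := ih cs hlen
      exact ⟨hL, fun j hj => by rw [hP j hj, hg]; simp⟩
    case pos =>
      rw [if_pos hc]
      have hsome : ((vocabIndexOf vocab).get? t).isSome := by
        rw [← PySem.Dict.contains_eq_isSome_get?]; exact hc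
      obtain ⟨i, hg⟩ := Option.isSome_iff_exists.1 hsome
      have hgd : (vocabIndexOf vocab).getD t 0 = i := by
        rw [PySem.Dict.getD_eq_get?_getD, hg]; rfl
      rw [hgd]
      obtain ⟨h0, hlt, -⟩ := vocabIndex_spec vocab t i hg
      have hi : i = ((i.toNat : Nat) : Int) := by omega
      rw [hi, PySem.List.pySetD_natCast, PySem.List.pyGetD_natCast]
      have hlen' : (cs.set i.toNat (cs.getD i.toNat 0 + 1)).length = vocab.length := by
        simpa using hlen
      obtain ⟨hL, hP⟩ := ih _ hlen'
      refine ⟨hL, fun j hj => ?_⟩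
      rw [hP j hj]
      have hset : (cs.set i.toNat (cs.getD i.toNat 0 + 1)).getD j 0
          = if i.toNat = j then cs.getD j 0 + 1 else cs.getD j 0 := by
        rw [getD_set_eq cs i.toNat j _ (by omega)]
        by_cases h : i.toNat = j
        · subst h; simp
        · simp [h]
      rw [hset, hg]
      by_cases hij : i.toNat = j
      · have hbeq : (some i == some ((j : Nat) : Int)) = true := by
          simp only [beq_iff_eq, Option.some.injEq]; omega
        rw [hbeq, if_pos hij]
        simp only [if_true]
        push_cast; ring
      · have hbeq : (some i == some ((j : Nat) : Int)) = false := by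
          simp only [beq_eq_false_iff_ne, ne_eq, Option.some.injEq]; omega
        rw [hbeq, if_neg hij]
        simp

-- items-side loop characterisation
theorem lemB (f : String → Int) (ps : List (String × Int)) (cs : List Int)
    (hb : ∀ p ∈ ps, 0 ≤ p.2 ∧ p.2.toNat < cs.length)
    (hnd : (ps.map (·.2)).Nodup) :
    (ps.foldl (fun cs p => PySem.List.pySetD cs p.2 (f p.1)) cs).length = cs.length ∧
    ∀ j : Nat, j < cs.length →
      ((ps.foldl (fun cs p => PySem.List.pySetD cs p.2 (f p.1)) cs).getD j 0)
      = (match ps.find? (fun p => p.2 == (j : Int)) with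
         | some p => f p.1
         | none => cs.getD j 0) := by
  induction ps generalizing cs with
  | nil => simp
  | cons p ps ih =>
    simp only [List.foldl_cons]
    obtain ⟨h0, hlt⟩ := hb p (by simp)
    have hsetD : PySem.List.pySetD cs p.2 (f p.1) = cs.set p.2.toNat (f p.1) := by
      rw [show p.2 = ((p.2.toNat : Nat) : Int) by omega, PySem.List.pySetD_natCast,
        Int.toNat_natCast]
    rw [hsetD]
    have hlen' : (cs.set p.2.toNat (f p.1)).length = cs.length := by simp
    obtain ⟨hL, hP⟩ := ih (cs.set p.2.toNat (f p.1))
      (fun q hq => by simpa [hlen'] using hb q (by simp [hq])) hnd.of_cons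
    refine ⟨hL.trans hlen', fun j hj => ?_⟩
    rw [hP j (by omega)]
    by_cases hij : p.2.toNat = j
    · have hpj : (p.2 == ((j : Nat) : Int)) = true := by
        simp only [beq_iff_eq]; omega
      rw [List.find?_cons_of_pos (p := fun q => q.2 == ((j : Nat) : Int)) (a := p) (l := ps) hpj]
      have hnone : ps.find? (fun q => q.2 == ((j : Nat) : Int)) = none := by
        rw [List.find?_eq_none]
        intro q hq hqj
        have hq2 : q.2 = p.2 := by simp only [beq_iff_eq] at hqj; omega
        exact (List.nodup_cons.1 hnd).1 (by simpa [hq2] using List.mem_map_of_mem (f := fun x => x.2) hq)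
      rw [hnone, getD_set_eq cs p.2.toNat j _ hlt, if_pos hij]
    · have hpj : (p.2 == ((j : Nat) : Int)) = false := by
        simp only [beq_eq_false_iff_ne, ne_eq]; omega
      rw [List.find?_cons_of_neg (p := fun q => q.2 == ((j : Nat) : Int)) (a := p) (l := ps)
        (ne_true_of_eq_false hpj)]
      rw [getD_set_eq cs p.2.toNat j _ hlt, if_neg hij]

theorem perDoc (vocab : List String) (doc : String) :
    (PySem.Str.split₀ doc).foldl (fun cs tok =>
      if (vocabIndexOf vocab).contains tok then
        let i := (vocabIndexOf vocab).getD tok 0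
        PySem.List.pySetD cs i (PySem.List.pyGetD cs i 0 + 1)
      else cs) (List.replicate vocab.length (0 : Int))
    = (vocabIndexOf vocab).items.foldl
        (fun cs p => PySem.List.pySetD cs p.2
          (((PySem.Str.split₀ doc).foldl (fun d t => d.insert t (d.getD t 0 + 1)) PySem.Dict.empty).getD p.1 0))
        (List.replicate vocab.length (0 : Int)) := by
  have hknd := vocabIndex_keys_nodup vocab
  have hb : ∀ p ∈ (vocabIndexOf vocab).items,
      0 ≤ p.2 ∧ p.2.toNat < (List.replicate vocab.length (0 : Int)).length := by
    intro p hp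
    have hg := PySem.Dict.get?_of_mem_items _ ((Prod.mk.eta (p := p)) ▸ hp) hknd
    obtain ⟨h0, hlt, -⟩ := vocabIndex_spec vocab p.1 p.2 hg
    simpa using ⟨h0, hlt⟩
  obtain ⟨hLa, hPa⟩ := lemA vocab (PySem.Str.split₀ doc) (List.replicate vocab.length (0 : Int)) (by simp)
  obtain ⟨hLb, hPb⟩ := lemB (fun k =>
      ((PySem.Str.split₀ doc).foldl (fun d t => d.insert t (d.getD t 0 + 1)) PySem.Dict.empty).getD k 0)
    (vocabIndexOf vocab).items _ hb (vocabIndex_items_snd_nodup vocab)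
  apply List.ext_getElem (by simp [hLa, hLb])
  intro j h1 h2
  have hj : j < vocab.length := hLa ▸ h1
  have ga : ∀ (l : List Int) (h : j < l.length), l[j] = l.getD j 0 := by
    intro l h; simp [List.getD_eq_getElem?_getD, List.getElem?_eq_getElem h]
  rw [ga _ h1, ga _ h2, hPa j hj, hPb j (by simpa using hj)]
  rw [PySem.Dict.foldl_insert_getD_add_one_eq_counter,
    List.getD_replicate (0 : Int) hj, zero_add]
  cases hf : (vocabIndexOf vocab).items.find? (fun p => p.2 == ((j : Nat) : Int)) with
  | some p =>
    have hmem := List.mem_of_find?_eq_some hf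
    have hpj : p.2 = ((j : Nat) : Int) := by
      have := List.find?_some hf; simpa using this
    have hgp := PySem.Dict.get?_of_mem_items _ ((Prod.mk.eta (p := p)) ▸ hmem) hknd
    obtain ⟨-, -, hvp⟩ := vocabIndex_spec vocab p.1 p.2 hgp
    simp only [PySem.Dict.getD_counter]
    congr 1
    rw [List.count_eq_countP]
    apply List.countP_congr
    intro t _
    constructor
    · intro ht
      simp only [beq_iff_eq] at ht ⊢
      obtain ⟨-, -, hvt⟩ := vocabIndex_spec vocab t _ (Option.mem_def.1 (by rw [ht]; rfl))
      rw [hpj] at hvp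
      simp only [Int.toNat_natCast] at hvp hvt
      rw [hvp] at hvt
      exact (Option.some.inj hvt).symm
    · intro ht
      simp only [beq_iff_eq] at ht ⊢
      subst ht
      rw [hgp, hpj]
  | none =>
    have : (PySem.Str.split₀ doc).countP
        (fun t => (vocabIndexOf vocab).get? t == some ((j : Nat) : Int)) = 0 := by
      rw [List.countP_eq_zero]
      intro t _ ht
      simp only [beq_iff_eq] at ht
      have hmem := PySem.Dict.mem_items_of_get?_eq_some _ ht
      have := List.find?_eq_none.1 hf _ hmem
      simp at this
    simp [this]

-- ===== VERDICT (by name: the statement is the Claim_ definition above) =====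
theorem bow_transform_spec : Claim_equal_bow_transform := by
  intro corpus vocab _
  unfold Spec_bow_transform bow_transform bow_transform_alt
  simp only [PySem.List.foldl_append_singleton_eq_map, List.nil_append]
  exact List.map_congr_left (fun doc _ => perDoc vocab doc)
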